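-- pv_equiv track=rewrite | github.com/amirskm/project-euler | 92.py | get_square_digit
-- ===== SOURCE A (Python) =====
-- def get_square_digit(n):
--
--     square_sum = 0
--
--     for i in range(0, len(str(n))):
--         square_sum += int(str(n)[i])**2
--
--     if square_sum == 1 or square_sum == 89:
--         return square_sum
--     else:
--         return get_square_digit(square_sum)
-- ===== SOURCE B (Python) =====
-- def get_square_digit(n):
--     while True:
--         square_sum = 0
--         m = n
--         while m > 0:
--             m, d = divmod(m, 10)
--             square_sum += d * d
--         if square_sum == 1 or square_sum == 89:
--             return square_sum
--         n = square_sum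
-- ===== Notes on version B (the rewrite author's own statement) =====
-- stated objective: alternative
-- what changed: Replaced the recursion over str(n) (rebuilding and indexing the decimal string at each position) with an explicit while-loop that extracts digits arithmetically via divmod(m, 10), never converting to a string.
-- outside the precondition, e.g. on get_square_digit(0): A raises RecursionError, B does not finish within the time limit; on get_square_digit(-5): A raises ValueError, B does not finish within the time limit
import Mathlib
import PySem

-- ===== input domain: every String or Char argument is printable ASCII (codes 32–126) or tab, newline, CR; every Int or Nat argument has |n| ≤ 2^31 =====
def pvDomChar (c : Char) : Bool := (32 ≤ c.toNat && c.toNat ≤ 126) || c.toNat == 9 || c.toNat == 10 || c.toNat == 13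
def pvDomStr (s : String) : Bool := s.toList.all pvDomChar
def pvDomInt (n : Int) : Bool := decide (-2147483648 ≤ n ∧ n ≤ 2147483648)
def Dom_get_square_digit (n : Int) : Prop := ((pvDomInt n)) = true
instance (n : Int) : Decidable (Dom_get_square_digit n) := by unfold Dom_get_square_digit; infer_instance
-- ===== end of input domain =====

-- B replaces A's recursion over str(n) by an explicit while-loop that extracts the digits
-- arithmetically with divmod(m, 10), never building a string. Both ports model Python's
-- unbounded recursion/loop by the same fuel bound (1000), far above any chain length
-- reachable from an input admitted by Pre_ within Dom_.

-- ===== PORT A =====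
-- square_sum = 0; for i in range(0, len(str(n))): square_sum += int(str(n)[i])**2
-- (str(n)[i] is always in range here, so the total pyGetD form is exact; int(c) via
--  PySem.Int.ofChars? with getD 0 — under Pre_ every character is a digit, so the
--  default is never taken.)
def pvSumSqA (n : Int) : Int :=
  (PySem.List.pyRange 0 (PySem.Str.len (PySem.Int.toStr n)) 1).foldl
    (fun acc i =>
      acc + ((PySem.Int.ofChars? [PySem.List.pyGetD (PySem.Int.toStr n).toList i ' ']).getD 0) ^ 2)
    0

def pvGsdA : Nat → Int → Int
  | 0, _ => 0
  | f + 1, n =>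
    let square_sum := pvSumSqA n
    if square_sum = 1 ∨ square_sum = 89 then square_sum else pvGsdA f square_sum

def get_square_digit (n : Int) : Int := pvGsdA 1000 n

-- ===== PORT B =====
-- inner while-loop: while m > 0: m, d = divmod(m, 10); square_sum += d * d
def pvDigitSqAux (m acc : Int) : Int :=
  if 0 < m then
    pvDigitSqAux (PySem.Int.floordiv m 10)
      (acc + PySem.Int.mod m 10 * PySem.Int.mod m 10)
  else acc
termination_by m.toNat
decreasing_by
  rw [PySem.Int.floordiv_eq_ediv_of_pos (by norm_num : (0:Int) < 10)]
  omega

-- outer while True loop, same fuel as A's recursion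
def pvGsdB : Nat → Int → Int
  | 0, _ => 0
  | f + 1, n =>
    let square_sum := pvDigitSqAux n 0
    if square_sum = 1 ∨ square_sum = 89 then square_sum else pvGsdB f square_sum

def get_square_digit_alt (n : Int) : Int := pvGsdB 1000 n

-- ===== PRECONDITION & SPEC =====
-- A raises ValueError on negative n (int('-')) and hits RecursionError on n = 0
-- (the chain 0 → 0 never reaches 1 or 89); Pre_ admits exactly the positive inputs.
def Pre_get_square_digit (n : Int) : Prop := 1 ≤ n
instance (n : Int) : Decidable (Pre_get_square_digit n) := by unfold Pre_get_square_digit; infer_instance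
def pvWitness_get_square_digit : Int := (44)

def Spec_get_square_digit (n : Int) (out : Int) : Prop := out = get_square_digit_alt n
instance (n : Int) (out : Int) : Decidable (Spec_get_square_digit n out) := by unfold Spec_get_square_digit; infer_instance

-- ===== CLAIM (what is proved, stated in full; the proofs are below) =====
def Claim_equal_get_square_digit : Prop := ∀ (n : Int), Dom_get_square_digit n → Pre_get_square_digit n → Spec_get_square_digit n (get_square_digit n)

-- ===== LEMMAS AND PROOFS =====

-- the digit-square sum of a Nat, lowest digit first (proof-side reference value)
def pvNatSq (m : Nat) : Int := ((Nat.digits 10 m).map (fun d => (d : Int) * (d : Int))).sum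

theorem pvNatSq_zero : pvNatSq 0 = 0 := by simp [pvNatSq]

theorem pvNatSq_pos (m : Nat) (hm : 0 < m) :
    pvNatSq m = ((m % 10 : Nat) : Int) * ((m % 10 : Nat) : Int) + pvNatSq (m / 10) := by
  unfold pvNatSq
  rw [Nat.digits_def' (by norm_num) hm]
  simp

theorem pvNatSq_ge_one (m : Nat) (hm : 1 ≤ m) : 1 ≤ pvNatSq m := by
  induction m using Nat.strong_induction_on with
  | _ m ih =>
    rw [pvNatSq_pos m hm]
    by_cases h : m < 10
    · have h0 : m % 10 = m := Nat.mod_eq_of_lt h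
      have h1 : m / 10 = 0 := Nat.div_eq_of_lt h
      rw [h0, h1, pvNatSq_zero]
      have : (1 : Int) ≤ (m : Int) := by exact_mod_cast hm
      nlinarith
    · have h1 : 1 ≤ m / 10 := by omega
      have := ih (m / 10) (by omega) h1
      have h2 : (0 : Int) ≤ ((m % 10 : Nat) : Int) * ((m % 10 : Nat) : Int) := by positivity
      linarith

-- the value g of one character of str(n) under A's int(·)**2
theorem pv_g_digitChar (k : Nat) (hk : k < 10) :
    ((PySem.Int.ofChars? [Nat.digitChar k]).getD 0) ^ 2 = (k : Int) * (k : Int) := by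
  interval_cases k <;> decide

-- toDigitsCore characterised by pvNatSq under the per-character map g
theorem pv_toDigitsCore_sum (fuel : Nat) :
    ∀ (m : Nat) (ds : List Char), m < fuel →
      ((Nat.toDigitsCore 10 fuel m ds).map
          (fun c => ((PySem.Int.ofChars? [c]).getD 0) ^ 2)).sum
        = pvNatSq m + ((ds.map (fun c => ((PySem.Int.ofChars? [c]).getD 0) ^ 2)).sum) := by
  induction fuel with
  | zero => intro m ds h; omega
  | succ fuel ih =>
    intro m ds h
    by_cases hm : m = 0
    · subst hm
      have hg : (PySem.Int.ofChars? [Nat.digitChar 0]).getD 0 = 0 := by decide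
      simp [Nat.toDigitsCore, pvNatSq_zero, hg]
    · have hm' : 0 < m := Nat.pos_of_ne_zero hm
      rw [pvNatSq_pos m hm']
      by_cases hq : m / 10 = 0
      · have hlt : m < 10 := by omega
        have : Nat.toDigitsCore 10 (fuel + 1) m ds = (m % 10).digitChar :: ds := by
          simp [Nat.toDigitsCore, hq]
        rw [this, hq, pvNatSq_zero]
        simp only [List.map_cons, List.sum_cons]
        rw [pv_g_digitChar (m % 10) (by omega)]
        ring
      · have : Nat.toDigitsCore 10 (fuel + 1) m ds
            = Nat.toDigitsCore 10 fuel (m / 10) ((m % 10).digitChar :: ds) := by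
          simp [Nat.toDigitsCore, hq]
        rw [this, ih (m / 10) _ (by omega)]
        simp only [List.map_cons, List.sum_cons]
        rw [pv_g_digitChar (m % 10) (by omega)]
        ring

-- A's inner loop computes pvNatSq of n (n ≥ 0)
theorem pvSumSqA_eq (n : Int) (hn : 0 ≤ n) : pvSumSqA n = pvNatSq n.toNat := by
  unfold pvSumSqA
  rw [show PySem.Str.len (PySem.Int.toStr n)
        = ((PySem.Int.toStr n).toList.length : Int) by simp [PySem.Str.len_eq]]
  rw [PySem.List.foldl_pyRange_zero_pyGetD' ((PySem.Int.toStr n).toList) ' '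
        (fun acc c => acc + ((PySem.Int.ofChars? [c]).getD 0) ^ 2) 0]
  have hfold : ∀ (xs : List Char) (acc : Int),
      xs.foldl (fun a c => a + ((PySem.Int.ofChars? [c]).getD 0) ^ 2) acc
        = acc + (xs.map (fun c => ((PySem.Int.ofChars? [c]).getD 0) ^ 2)).sum := by
    intro xs
    induction xs with
    | nil => simp
    | cons x xs ih => intro acc; simp [List.foldl, ih]; ring
  rw [hfold]
  have hchars : (PySem.Int.toStr n).toList = Nat.toDigits 10 n.toNat := by
    rw [PySem.Int.toList_toStr]
    simp [PySem.Int.toChars, not_lt.mpr hn]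
  rw [hchars]
  unfold Nat.toDigits
  rw [pv_toDigitsCore_sum (n.toNat + 1) n.toNat [] (by omega)]
  simp

-- B's inner loop computes pvNatSq too
theorem pvDigitSqAux_eq (m : Nat) : ∀ acc : Int, pvDigitSqAux (m : Int) acc = acc + pvNatSq m := by
  induction m using Nat.strong_induction_on with
  | _ m ih =>
    intro acc
    by_cases hm : 0 < m
    · rw [pvDigitSqAux]
      have hpos : (0 : Int) < (m : Int) := by exact_mod_cast hm
      rw [if_pos hpos]
      have h10 : (10 : Int) = ((10 : Nat) : Int) := by norm_num
      rw [h10, PySem.Int.floordiv_natCast, PySem.Int.mod_natCast]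
      rw [ih (m / 10) (Nat.div_lt_self hm (by norm_num))]
      rw [pvNatSq_pos m hm]
      ring
    · have : m = 0 := by omega
      subst this
      rw [pvDigitSqAux]
      simp [pvNatSq_zero]

theorem pvSum_agree (n : Int) (hn : 0 ≤ n) : pvSumSqA n = pvDigitSqAux n 0 := by
  calc pvSumSqA n = pvNatSq n.toNat := pvSumSqA_eq n hn
    _ = 0 + pvNatSq n.toNat := by ring
    _ = pvDigitSqAux ((n.toNat : Nat) : Int) 0 := (pvDigitSqAux_eq n.toNat 0).symm
    _ = pvDigitSqAux n 0 := by rw [Int.toNat_of_nonneg hn]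

theorem pvGsd_eq : ∀ (f : Nat) (n : Int), 1 ≤ n → pvGsdA f n = pvGsdB f n := by
  intro f
  induction f with
  | zero => intro n _; rfl
  | succ f ih =>
    intro n hn
    have hsum : pvSumSqA n = pvDigitSqAux n 0 := pvSum_agree n (by omega)
    have hge : 1 ≤ pvSumSqA n := by
      rw [pvSumSqA_eq n (by omega)]
      exact pvNatSq_ge_one n.toNat (by omega)
    simp only [pvGsdA, pvGsdB, ← hsum]
    split_ifs with h
    · rfl
    · exact ih _ hge

-- ===== VERDICT (by name: the statement is the Claim_ definition above) =====
theorem get_square_digit_spec : Claim_equal_get_square_digit := by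
  intro n _ hn
  unfold Spec_get_square_digit get_square_digit get_square_digit_alt
  exact pvGsd_eq 1000 n hn
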